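-- pv_equiv track=rewrite | github.com/Sushant-Chavan/coordination_oru | generators/logging/LogParser.py | get_test_num_from_line_num
-- ===== SOURCE A (Python) =====
-- def get_test_num_from_line_num(ln_to_test_dic, line_num):
--     test_start_line_num = sorted(ln_to_test_dic.keys())
--
--     test_num = None
--     for n, k in enumerate(test_start_line_num):
--         if k < line_num:
--             test_num = n
--         else:
--             break
--
--     return test_num
-- ===== SOURCE B (Python) =====
-- def get_test_num_from_line_num(ln_to_test_dic, line_num):
--     keys = sorted(ln_to_test_dic.keys())
--     lo, hi = 0, len(keys)
--     while lo < hi: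
--         mid = (lo + hi) // 2
--         if keys[mid] < line_num:
--             lo = mid + 1
--         else:
--             hi = mid
--     return lo - 1 if lo > 0 else None
-- ===== Notes on version B (the rewrite author's own statement) =====
-- stated objective: alternative
-- what changed: The early-breaking linear scan over the sorted keys is replaced by a hand-rolled binary search (bisect_left) for the number of keys strictly below line_num, returning that count minus one or None.
import Mathlib
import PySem

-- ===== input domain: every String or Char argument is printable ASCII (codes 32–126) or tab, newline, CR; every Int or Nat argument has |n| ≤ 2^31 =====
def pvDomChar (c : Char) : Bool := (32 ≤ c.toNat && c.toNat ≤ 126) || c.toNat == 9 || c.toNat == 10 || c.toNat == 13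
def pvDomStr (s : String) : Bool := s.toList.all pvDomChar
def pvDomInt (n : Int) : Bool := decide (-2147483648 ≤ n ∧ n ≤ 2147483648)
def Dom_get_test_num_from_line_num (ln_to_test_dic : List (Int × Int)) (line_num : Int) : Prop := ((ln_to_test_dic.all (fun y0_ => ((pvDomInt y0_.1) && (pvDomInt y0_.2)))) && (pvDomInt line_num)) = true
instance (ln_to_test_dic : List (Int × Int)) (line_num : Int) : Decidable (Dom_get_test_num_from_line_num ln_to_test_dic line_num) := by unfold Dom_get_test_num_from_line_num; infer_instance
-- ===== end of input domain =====

-- B replaces A's early-breaking linear scan over the sorted keys by a binary search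
-- (bisect_left written out) for the count of keys below line_num: an alternative algorithm.

-- ===== PORT A =====
-- 'for n, k in enumerate(test_start_line_num): if k < line_num: test_num = n else: break'
def pvLoopA (line_num : Int) : List Int → Int → Option Int → Option Int
  | [], _, acc => acc
  | k :: rest, n, acc =>
      if k < line_num then pvLoopA line_num rest (n + 1) (some n) else acc

def get_test_num_from_line_num (ln_to_test_dic : List (Int × Int)) (line_num : Int) : Option Int :=
  let test_start_line_num :=
    PySem.List.sorted (PySem.Dict.ofList ln_to_test_dic).keys (fun x => x) false
  pvLoopA line_num test_start_line_num 0 none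

-- ===== PORT B =====
-- the while-loop binary search of Source B; keys[mid] is ported as getD (mid is always in range)
def pvBisect (keys : List Int) (line_num : Int) (lo hi : Nat) : Nat :=
  if lo < hi then
    let mid := (lo + hi) / 2
    if keys.getD mid 0 < line_num then pvBisect keys line_num (mid + 1) hi
    else pvBisect keys line_num lo mid
  else lo
termination_by hi - lo
decreasing_by all_goals omega

def get_test_num_from_line_num_alt (ln_to_test_dic : List (Int × Int)) (line_num : Int) : Option Int :=
  let keys := PySem.List.sorted (PySem.Dict.ofList ln_to_test_dic).keys (fun x => x) false
  let lo := pvBisect keys line_num 0 keys.length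
  if lo > 0 then some ((lo : Int) - 1) else none

-- ===== PRECONDITION & SPEC =====
def Spec_get_test_num_from_line_num (ln_to_test_dic : List (Int × Int)) (line_num : Int) (out : Option Int) : Prop := out = get_test_num_from_line_num_alt ln_to_test_dic line_num
instance (ln_to_test_dic : List (Int × Int)) (line_num : Int) (out : Option Int) : Decidable (Spec_get_test_num_from_line_num ln_to_test_dic line_num out) := by unfold Spec_get_test_num_from_line_num; infer_instance

-- ===== CLAIM (what is proved, stated in full; the proofs are below) =====
def Claim_equal_get_test_num_from_line_num : Prop := ∀ (ln_to_test_dic : List (Int × Int)) (line_num : Int), Dom_get_test_num_from_line_num ln_to_test_dic line_num → Spec_get_test_num_from_line_num ln_to_test_dic line_num (get_test_num_from_line_num ln_to_test_dic line_num)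

-- ===== LEMMAS AND PROOFS =====

-- A's scan over a weakly increasing list returns (count of elements < line_num) - 1, or acc if none.
theorem pvLoopA_eq (ln : Int) (l : List Int) (h : l.Pairwise (· ≤ ·)) (n : Int) (acc : Option Int) :
    pvLoopA ln l n acc =
      if l.countP (fun k => decide (k < ln)) = 0 then acc
      else some (n + (l.countP (fun k => decide (k < ln)) : Int) - 1) := by
  induction l generalizing n acc with
  | nil => simp [pvLoopA]
  | cons k rest ih =>
    rcases List.pairwise_cons.mp h with ⟨hk, hrest⟩
    by_cases hlt : k < ln
    · rw [show pvLoopA ln (k :: rest) n acc = pvLoopA ln rest (n + 1) (some n) by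
        simp [pvLoopA, hlt]]
      rw [ih hrest, List.countP_cons_of_pos (by simpa using hlt)]
      rcases Nat.eq_zero_or_pos (rest.countP (fun k => decide (k < ln))) with h0 | h0
      · rw [if_pos h0, if_neg (by omega), h0]
        norm_num
      · rw [if_neg (by omega), if_neg (by omega)]
        congr 1
        push_cast
        ring
    · have hz : rest.countP (fun k => decide (k < ln)) = 0 := by
        apply List.countP_eq_zero.mpr
        intro a ha
        simp only [decide_eq_true_eq, not_lt]
        exact le_trans (not_lt.mp hlt) (hk a ha)
      simp [pvLoopA, hlt, List.countP_cons_of_neg, hz]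

-- invariant characterisation of the binary search (d bounds the recursion depth measure hi - lo)
theorem pvBisect_char (l : List Int) (ln : Int) (hs : l.Pairwise (· ≤ ·)) :
    ∀ (d lo hi : Nat), hi - lo ≤ d → lo ≤ hi → hi ≤ l.length →
    (∀ i, i < lo → l.getD i 0 < ln) →
    (∀ i, hi ≤ i → i < l.length → ¬ l.getD i 0 < ln) →
    pvBisect l ln lo hi ≤ l.length ∧
    (∀ i, i < pvBisect l ln lo hi → l.getD i 0 < ln) ∧
    (∀ i, pvBisect l ln lo hi ≤ i → i < l.length → ¬ l.getD i 0 < ln) := by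
  have hmono : ∀ i j : Nat, i ≤ j → j < l.length → l.getD i 0 ≤ l.getD j 0 := by
    intro i j hij hj
    rcases Nat.lt_or_ge i j with hlt | hge
    · have := (List.pairwise_iff_getElem.mp hs) i j (lt_of_lt_of_le hlt (le_of_lt hj)) hj hlt
      rwa [List.getD_eq_getElem l 0 (lt_of_lt_of_le hlt (le_of_lt hj)),
           List.getD_eq_getElem l 0 hj]
    · have : i = j := le_antisymm hij hge
      simp [this]
  intro d
  induction d with
  | zero =>
    intro lo hi hd hle hhi h1 h2
    have hcond : ¬ lo < hi := by omega
    rw [show pvBisect l ln lo hi = lo by rw [pvBisect]; simp [hcond]]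
    have hlohi : lo = hi := by omega
    exact ⟨by omega, h1, by rw [hlohi]; exact h2⟩
  | succ d IH =>
    intro lo hi hd hle hhi h1 h2
    by_cases hcond : lo < hi
    · rw [show pvBisect l ln lo hi =
          (if l.getD ((lo + hi) / 2) 0 < ln then pvBisect l ln ((lo + hi) / 2 + 1) hi
           else pvBisect l ln lo ((lo + hi) / 2)) by rw [pvBisect]; simp [hcond]]
      have hmidlt : (lo + hi) / 2 < hi := by omega
      have hmidge : lo ≤ (lo + hi) / 2 := by omega
      split_ifs with hv
      · exact IH ((lo + hi) / 2 + 1) hi (by omega) (by omega) hhi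
          (fun i hi2 => by
            rcases Nat.lt_or_ge i ((lo + hi) / 2) with h' | h'
            · exact lt_of_le_of_lt (hmono i ((lo + hi) / 2) (le_of_lt h') (lt_of_lt_of_le hmidlt hhi)) hv
            · have hieq : i = (lo + hi) / 2 := by omega
              simpa [hieq] using hv)
          h2
      · exact IH lo ((lo + hi) / 2) (by omega) (by omega) (by omega) h1
          (fun i hi2 hi3 => fun hc =>
            hv (lt_of_le_of_lt (hmono ((lo + hi) / 2) i hi2 hi3) hc))
    · rw [show pvBisect l ln lo hi = lo by rw [pvBisect]; simp [hcond]]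
      have hlohi : lo = hi := by omega
      exact ⟨by omega, h1, by rw [hlohi]; exact h2⟩

-- a position r splitting the list into (all < ln) / (all ≥ ln) equals the count of elements < ln
theorem countP_eq_of_split (l : List Int) (ln : Int) (r : Nat) (hr : r ≤ l.length)
    (h1 : ∀ i, i < r → l.getD i 0 < ln)
    (h2 : ∀ i, r ≤ i → i < l.length → ¬ l.getD i 0 < ln) :
    l.countP (fun k => decide (k < ln)) = r := by
  conv_lhs => rw [← List.take_append_drop r l]
  rw [List.countP_append]
  have ht : (l.take r).countP (fun k => decide (k < ln)) = r := by
    rw [List.countP_eq_length.mpr, List.length_take]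
    · omega
    · intro a ha
      obtain ⟨i, hi, rfl⟩ := List.mem_iff_getElem.mp ha
      rw [List.getElem_take]
      have hil : i < l.length := by
        have := hi; rw [List.length_take] at this; omega
      rw [← List.getD_eq_getElem l 0 hil]
      have hir : i < r := by
        have := hi; rw [List.length_take] at this; omega
      simpa using h1 i hir
  have hd : (l.drop r).countP (fun k => decide (k < ln)) = 0 := by
    apply List.countP_eq_zero.mpr
    intro a ha
    obtain ⟨i, hi, rfl⟩ := List.mem_iff_getElem.mp ha
    rw [List.getElem_drop]
    have hil : r + i < l.length := by
      have := hi; rw [List.length_drop] at this; omega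
    rw [← List.getD_eq_getElem l 0 hil]
    simpa using h2 (r + i) (by omega) hil
  omega

-- ===== VERDICT (by name: the statement is the Claim_ definition above) =====
theorem get_test_num_from_line_num_spec : Claim_equal_get_test_num_from_line_num := by
  intro d ln _
  unfold Spec_get_test_num_from_line_num get_test_num_from_line_num get_test_num_from_line_num_alt
  set l := PySem.List.sorted (PySem.Dict.ofList d).keys (fun x => x) false with hl
  have hs : l.Pairwise (· ≤ ·) := by
    simpa using PySem.List.sorted_pairwise (PySem.Dict.ofList d).keys (fun x => x)
  have hchar := pvBisect_char l ln hs l.length 0 l.length (by omega) (Nat.zero_le _) le_rfl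
    (by omega) (by omega)
  have hc : l.countP (fun k => decide (k < ln)) = pvBisect l ln 0 l.length :=
    countP_eq_of_split l ln _ hchar.1 hchar.2.1 hchar.2.2
  rw [pvLoopA_eq ln l hs 0 none, hc]
  show (if pvBisect l ln 0 l.length = 0 then none
        else some (0 + (pvBisect l ln 0 l.length : Int) - 1)) =
      if pvBisect l ln 0 l.length > 0 then some ((pvBisect l ln 0 l.length : Int) - 1) else none
  split_ifs with h0 h1 h1
  · omega
  · rfl
  · congr 1; omega
  · omega
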